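-- pv_equiv track=rewrite | github.com/Zirconium233/HybridFusion | analysis_data.py | center_positions
-- ===== SOURCE A (Python) =====
-- def center_positions(n: int):
--     """
--     返回长度为 n 的位置序列，使得第一个分配位置为中心，随后向两侧扩散：
--     例如 n=5 -> [2,3,1,4,0] (0-based index), n=4 -> [1,2,0,3]
--     便于把最高分的元素放在中心附近。
--     """
--     if n <= 0:
--         return []
--     mid = (n - 1) // 2
--     pos = [mid]
--     step = 1
--     while len(pos) < n:
--         right = mid + step
--         if right < n:
--             pos.append(right)
--         left = mid - step
--         if left >= 0 and len(pos) < n: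
--             pos.append(left)
--         step += 1
--     return pos
-- ===== SOURCE B (Python) =====
-- def center_positions(n: int):
--     if n <= 0:
--         return []
--     mid = (n - 1) // 2
--     def f(k):
--         if k > 2 * mid:
--             return k
--         return mid + (k + 1) // 2 if k % 2 else mid - k // 2
--     return [f(k) for k in range(n)]
-- ===== Notes on version B (the rewrite author's own statement) =====
-- stated objective: alternative
-- what changed: Replaces the incremental step-counting while loop that grows the list with bounds checks by a direct closed-form formula computing the value at each output index from its parity and distance into the sequence, mapped over range(n).
import Mathlib
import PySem

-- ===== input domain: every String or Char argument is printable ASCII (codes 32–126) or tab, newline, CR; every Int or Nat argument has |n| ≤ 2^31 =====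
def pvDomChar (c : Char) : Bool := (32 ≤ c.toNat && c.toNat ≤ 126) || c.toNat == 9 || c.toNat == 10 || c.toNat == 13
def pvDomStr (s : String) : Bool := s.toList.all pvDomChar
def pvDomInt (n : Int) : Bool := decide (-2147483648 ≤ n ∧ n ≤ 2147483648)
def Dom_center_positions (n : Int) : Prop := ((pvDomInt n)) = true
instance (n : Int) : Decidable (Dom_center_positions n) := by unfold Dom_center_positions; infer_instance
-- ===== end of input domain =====

-- B replaces A's incremental step-counting while loop by a closed-form formula for the
-- value at each output index k, mapped over range(n); objective: alternative.

-- ===== PORT A =====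
-- while len(pos) < n: append right if in range, then left if in range; step += 1.
-- fuel bounds the iteration count (n.toNat always suffices; proved in the lemmas below).
def centerLoop (n mid : Int) (fuel : Nat) (pos : List Int) (step : Int) : List Int :=
  match fuel with
  | 0 => pos
  | f + 1 =>
    if (pos.length : Int) < n then
      let right := mid + step
      let pos1 := if right < n then pos ++ [right] else pos
      let left := mid - step
      let pos2 := if 0 ≤ left ∧ (pos1.length : Int) < n then pos1 ++ [left] else pos1
      centerLoop n mid f pos2 (step + 1)
    else pos

def center_positions (n : Int) : List Int :=
  if n ≤ 0 then []
  else
    let mid := PySem.Int.floordiv (n - 1) 2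
    centerLoop n mid n.toNat [mid] 1

-- ===== PORT B =====
-- helper f of Source B: the value at output index k
def centerAt (mid k : Int) : Int :=
  if 2 * mid < k then k
  else if PySem.Int.mod k 2 ≠ 0 then mid + PySem.Int.floordiv (k + 1) 2
  else mid - PySem.Int.floordiv k 2

def center_positions_alt (n : Int) : List Int :=
  if n ≤ 0 then []
  else
    let mid := PySem.Int.floordiv (n - 1) 2
    (PySem.List.pyRange 0 n 1).map (centerAt mid)

-- ===== PRECONDITION & SPEC =====
def Spec_center_positions (n : Int) (out : List Int) : Prop := out = center_positions_alt n
instance (n : Int) (out : List Int) : Decidable (Spec_center_positions n out) := by unfold Spec_center_positions; infer_instance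

-- ===== CLAIM (what is proved, stated in full; the proofs are below) =====
def Claim_equal_center_positions : Prop := ∀ (n : Int), Dom_center_positions n → Spec_center_positions n (center_positions n)

-- ===== LEMMAS AND PROOFS =====

-- interleave rights and lefts, remaining rights at the end
def remIL : List Int → List Int → List Int
  | rs, [] => rs
  | r :: rs, _l :: ls => r :: _l :: remIL rs ls
  | [], _ :: _ => []

lemma remIL_nil (rs : List Int) : remIL rs [] = rs := by cases rs <;> rfl

lemma centerLoop_eq (n mid : Int) (hmn : 2 * mid + 1 ≤ n) :
    ∀ (fuel : Nat) (step : Int) (pos : List Int),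
      (pos.length : Int) + ((n - (mid + step)).toNat : Int) + ((mid - step + 1).toNat : Int) = n →
      ((n - (mid + step)).toNat : Int) + ((mid - step + 1).toNat : Int) ≤ (fuel : Nat) →
      centerLoop n mid fuel pos step =
        pos ++ remIL (PySem.List.pyRange (mid + step) n 1)
                     (PySem.List.pyRange (mid - step) (-1) (-1)) := by
  intro fuel
  induction fuel with
  | zero =>
    intro step pos hlen hfuel
    have hR : n ≤ mid + step := by omega
    have hL : mid - step ≤ -1 := by omega
    rw [PySem.List.pyRange_one_eq_nil hR, PySem.List.pyRange_neg_one_eq_nil hL]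
    simp [centerLoop, remIL]
  | succ f ih =>
    intro step pos hlen hfuel
    simp only [centerLoop]
    by_cases hguard : (pos.length : Int) < n
    · rw [if_pos hguard]
      by_cases hr : mid + step < n
      · -- rights nonempty
        rw [PySem.List.pyRange_one_cons hr]
        by_cases hl : 0 ≤ mid - step
        · -- lefts nonempty too; both get appended
          rw [PySem.List.pyRange_neg_one_cons (by omega : (-1 : Int) < mid - step)]
          have h1 : ((pos ++ [mid + step]).length : Int) < n := by
            simp only [List.length_append, List.length_cons, List.length_nil]
            push_cast; omega
          rw [if_pos hr, if_pos ⟨hl, h1⟩]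
          rw [ih (step + 1) ((pos ++ [mid + step]) ++ [mid - step])
            (by simp only [List.length_append, List.length_cons, List.length_nil]; push_cast; omega)
            (by omega)]
          have e1 : mid + step + 1 = mid + (step + 1) := by ring
          have e2 : mid - step - 1 = mid - (step + 1) := by ring
          rw [e1, e2]
          simp [remIL]
        · -- left out of range: only right appended
          have hLnil : PySem.List.pyRange (mid - step) (-1) (-1) = [] :=
            PySem.List.pyRange_neg_one_eq_nil (by omega)
          rw [hLnil]
          rw [if_pos hr]
          have hnotl : ¬ (0 ≤ mid - step ∧ ((pos ++ [mid + step]).length : Int) < n) := by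
            intro h; exact hl h.1
          rw [if_neg hnotl]
          rw [ih (step + 1) (pos ++ [mid + step])
            (by simp only [List.length_append, List.length_cons, List.length_nil]; push_cast; omega)
            (by omega)]
          have e1 : mid + step + 1 = mid + (step + 1) := by ring
          rw [e1]
          have hLnil' : PySem.List.pyRange (mid - (step + 1)) (-1) (-1) = [] :=
            PySem.List.pyRange_neg_one_eq_nil (by omega)
          rw [hLnil']
          simp [remIL]
      · -- right ≥ n: impossible while the guard holds (rights count ≥ lefts count)
        exfalso; omega
    · rw [if_neg hguard]
      have hR : n ≤ mid + step := by omega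
      have hL : mid - step ≤ -1 := by omega
      rw [PySem.List.pyRange_one_eq_nil hR, PySem.List.pyRange_neg_one_eq_nil hL]
      simp [remIL]

-- closed-form values of centerAt at odd / even indices within the alternating zone
lemma centerAt_odd (mid s : Int) (_h1 : 1 ≤ s) (h2 : s ≤ mid) :
    centerAt mid (2 * s - 1) = mid + s := by
  unfold centerAt
  simp only [PySem.Int.mod_eq_emod_of_pos (by omega : (0:Int) < 2),
      PySem.Int.floordiv_eq_ediv_of_pos (by omega : (0:Int) < 2)]
  split_ifs <;> omega

lemma centerAt_even (mid s : Int) (h2 : 0 ≤ s) (h3 : s ≤ mid) :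
    centerAt mid (2 * s) = mid - s := by
  unfold centerAt
  simp only [PySem.Int.mod_eq_emod_of_pos (by omega : (0:Int) < 2),
      PySem.Int.floordiv_eq_ediv_of_pos (by omega : (0:Int) < 2)]
  split_ifs <;> omega

-- the interleaved pair of ranges equals B's map over the tail of range(n)
lemma remIL_eq_map (n mid : Int) (_hm : 0 ≤ mid) (hub : 2 * mid + 1 ≤ n) :
    ∀ (d : Nat) (s : Int), 1 ≤ s → s + d = mid + 1 →
      remIL (PySem.List.pyRange (mid + s) n 1) (PySem.List.pyRange (mid - s) (-1) (-1))
        = (PySem.List.pyRange (2 * s - 1) n 1).map (centerAt mid) := by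
  intro d
  induction d with
  | zero =>
    intro s h1 h2
    have hs : s = mid + 1 := by omega
    subst hs
    rw [PySem.List.pyRange_neg_one_eq_nil (by omega)]
    rw [remIL_nil]
    have he : mid + (mid + 1) = 2 * (mid + 1) - 1 := by ring
    rw [he]
    rw [List.map_congr_left (fun x hx => ?_), List.map_id]
    have := (PySem.List.mem_pyRange_one.mp hx).1
    show centerAt mid x = x
    unfold centerAt
    rw [if_pos (by omega)]
  | succ d ih =>
    intro s h1 h2
    have hsm : s ≤ mid := by omega
    rw [PySem.List.pyRange_one_cons (by omega : mid + s < n),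
        PySem.List.pyRange_neg_one_cons (by omega : (-1:Int) < mid - s)]
    rw [PySem.List.pyRange_one_cons (by omega : 2 * s - 1 < n),
        show 2 * s - 1 + 1 = 2 * s from by ring,
        PySem.List.pyRange_one_cons (by omega : 2 * s < n)]
    simp only [remIL, List.map_cons]
    rw [centerAt_odd mid s h1 hsm, centerAt_even mid s (by omega) hsm]
    rw [show mid + s + 1 = mid + (s + 1) from by ring,
        show mid - s - 1 = mid - (s + 1) from by ring,
        show 2 * s + 1 = 2 * (s + 1) - 1 from by ring]
    rw [ih (s + 1) (by omega) (by omega)]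

lemma mid_bounds (n : Int) (hn : 0 < n) :
    2 * PySem.Int.floordiv (n - 1) 2 ≤ n - 1 ∧ n - 1 ≤ 2 * PySem.Int.floordiv (n - 1) 2 + 1
      ∧ 0 ≤ PySem.Int.floordiv (n - 1) 2 := by
  have h := PySem.Int.floordiv_mul_add_mod (n - 1) 2
  have h1 := PySem.Int.mod_nonneg (n - 1) (by omega : (0:Int) < 2)
  have h2 := PySem.Int.mod_lt (n - 1) (by omega : (0:Int) < 2)
  refine ⟨by omega, by omega, by omega⟩

-- ===== VERDICT (by name: the statement is the Claim_ definition above) =====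
theorem center_positions_spec : Claim_equal_center_positions := by
  intro n _
  unfold Spec_center_positions center_positions center_positions_alt
  by_cases hn : n ≤ 0
  · simp [hn]
  · rw [if_neg hn, if_neg hn]
    set mid := PySem.Int.floordiv (n - 1) 2 with hmid
    obtain ⟨hb1, hb2, hb3⟩ := mid_bounds n (by omega)
    have hlen1 : ((([mid] : List Int)).length : Int)
        + ((n - (mid + 1)).toNat : Int) + ((mid - 1 + 1).toNat : Int) = n := by
      simp only [List.length_cons, List.length_nil]; push_cast; omega
    have hfuel : ((n - (mid + 1)).toNat : Int) + ((mid - 1 + 1).toNat : Int) ≤ (n.toNat : Nat) := by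
      omega
    rw [centerLoop_eq n mid (by omega) n.toNat 1 [mid] hlen1 hfuel]
    rw [remIL_eq_map n mid hb3 (by omega) mid.toNat 1 (by omega) (by omega)]
    rw [PySem.List.pyRange_one_cons (by omega : (0:Int) < n), List.map_cons]
    have h0 : centerAt mid 0 = mid := by
      unfold centerAt
      simp only [PySem.Int.mod_eq_emod_of_pos (by omega : (0:Int) < 2),
          PySem.Int.floordiv_eq_ediv_of_pos (by omega : (0:Int) < 2)]
      split_ifs <;> omega
    rw [show (2:Int) * 1 - 1 = 0 + 1 from by norm_num, h0]
    rfl
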